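-- pv_equiv track=rewrite | github.com/posl/comment_recommendation | script/mod_gen/5_time/en/230_D/8.py | solve
-- ===== SOURCE A (Python) =====
-- def solve(N,D,LR):
--     LR.sort()
--     L,R = [],[]
--     for l,r in LR:
--         L.append(l)
--         R.append(r)
--     L.sort()
--     R.sort()
--     L.append(10**9+1)
--     R.append(10**9+1)
--     ans = 0
--     l,r = 0,0
--     for i in range(1,N+1):
--         while L[l] <= i:
--             l += 1
--         while R[r] <= i:
--             r += 1
--         ans = max(ans,r-l)
--     return ans
-- ===== SOURCE B (Python) =====
-- def solve(N, D, LR):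
--     # Alternative algorithm: instead of sweeping i = 1..N with two sorted pointer
--     # scans, evaluate the count difference only at the candidate positions
--     # (the clamped right endpoints), where its maximum must occur.
--     LR.sort()  # keep A's observable in-place sort of the argument
--     ans = 0
--     for _, r in LR:
--         p = r if r > 1 else 1
--         if p <= N:
--             c = 0
--             for l2, r2 in LR:
--                 if r2 <= p:
--                     c += 1
--                 if l2 <= p:
--                     c -= 1
--             if c > ans:
--                 ans = c
--     return ans
-- ===== Notes on version B (the rewrite author's own statement) =====
-- stated objective: alternative
-- what changed: Replaces the Theta(N) sweep over every i in 1..N with dual sorts and two advancing pointers by evaluating the L/R prefix-count difference only at the clamped right endpoints (where the maximum must occur), making the cost depend on len(LR) instead of N.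
import Mathlib
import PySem

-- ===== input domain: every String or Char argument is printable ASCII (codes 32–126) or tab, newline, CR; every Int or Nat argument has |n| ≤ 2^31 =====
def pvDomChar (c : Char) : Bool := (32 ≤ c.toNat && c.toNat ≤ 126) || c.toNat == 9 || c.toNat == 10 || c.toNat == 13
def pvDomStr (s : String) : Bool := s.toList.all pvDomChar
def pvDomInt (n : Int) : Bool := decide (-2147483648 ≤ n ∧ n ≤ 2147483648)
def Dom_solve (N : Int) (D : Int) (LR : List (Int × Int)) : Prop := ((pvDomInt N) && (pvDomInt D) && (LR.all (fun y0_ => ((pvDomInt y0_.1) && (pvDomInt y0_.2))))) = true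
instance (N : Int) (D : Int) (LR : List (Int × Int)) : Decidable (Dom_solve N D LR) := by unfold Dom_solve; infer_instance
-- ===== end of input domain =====

-- B replaces A's Θ(N) pointer sweep over i = 1..N by evaluating the count difference
-- only at the clamped right endpoints; equivalence is about the RETURN value (both
-- Pythons sort LR in place identically).

-- ===== PORT A =====
-- 'while L[l] <= i: l += 1' — fuel-bounded index advance; fuel = len+1 always suffices,
-- the 'none' branch is Python's IndexError (excluded by Pre_solve).
def advA (xs : List Int) (i : Int) : Nat → Nat → Nat
  | j, 0 => j
  | j, fuel+1 =>
    match xs[j]? with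
    | some v => if v ≤ i then advA xs i (j+1) fuel else j
    | none => j

def solve (N : Int) (D : Int) (LR : List (Int × Int)) : Int :=
  let LRs := PySem.List.sorted2 LR Prod.fst Prod.snd
  let lr := LRs.foldl (fun (ac : List Int × List Int) q => (ac.1 ++ [q.1], ac.2 ++ [q.2])) ([], [])
  let Lx := PySem.List.sorted lr.1 (fun x => x) ++ [10^9+1]
  let Rx := PySem.List.sorted lr.2 (fun x => x) ++ [10^9+1]
  let st := (PySem.List.pyRange 1 (N+1) 1).foldl
    (fun (s : Int × Nat × Nat) i =>
      let l := advA Lx i s.2.1 (Lx.length + 1)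
      let r := advA Rx i s.2.2 (Rx.length + 1)
      (max s.1 ((r : Int) - (l : Int)), l, r))
    (0, 0, 0)
  st.1

-- ===== PORT B =====
def solve_alt (N : Int) (D : Int) (LR : List (Int × Int)) : Int :=
  let LRs := PySem.List.sorted2 LR Prod.fst Prod.snd
  LRs.foldl (fun ans q =>
    let p := if q.2 > 1 then q.2 else 1
    if p ≤ N then
      let c := LRs.foldl (fun (c : Int) t =>
        let c := if t.2 ≤ p then c + 1 else c
        if t.1 ≤ p then c - 1 else c) 0
      if c > ans then c else ans
    else ans) 0

-- ===== PRECONDITION & SPEC =====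
-- Pre_solve excludes exactly the inputs where A raises IndexError: the i-loop walks a
-- pointer past the 10^9+1 sentinel (and off the list) iff N reaches both the sentinel
-- and every stored l-value, and likewise for the r-values.
def Pre_solve (N : Int) (D : Int) (LR : List (Int × Int)) : Prop :=
  N ≤ 10^9 ∨ ((∃ q ∈ LR, N < q.1) ∧ (∃ q ∈ LR, N < q.2))
instance (N : Int) (D : Int) (LR : List (Int × Int)) : Decidable (Pre_solve N D LR) := by
  unfold Pre_solve; infer_instance

def pvWitness_solve : Int × Int × (List (Int × Int)) := (3, 0, [(1, 2), (2, 3)])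

def Spec_solve (N : Int) (D : Int) (LR : List (Int × Int)) (out : Int) : Prop := out = solve_alt N D LR
instance (N : Int) (D : Int) (LR : List (Int × Int)) (out : Int) : Decidable (Spec_solve N D LR out) := by unfold Spec_solve; infer_instance

-- ===== CLAIM (what is proved, stated in full; the proofs are below) =====
def Claim_equal_solve : Prop := ∀ (N : Int) (D : Int) (LR : List (Int × Int)), Dom_solve N D LR → Pre_solve N D LR → Spec_solve N D LR (solve N D LR)

-- ===== LEMMAS AND PROOFS =====

-- the common mathematical value: #(r ≤ i) − #(l ≤ i) over LR
def fDiff (LR : List (Int × Int)) (i : Int) : Int :=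
  (LR.countP (fun q => decide (q.2 ≤ i)) : Int) - (LR.countP (fun q => decide (q.1 ≤ i)) : Int)

-- length of the ≤-i prefix (the resting place of A's pointers)
def tl (xs : List Int) (i : Int) : Nat := (xs.takeWhile (fun v => decide (v ≤ i))).length

theorem pairBuild (l : List (Int × Int)) (a b : List Int) :
    (l.foldl (fun (ac : List Int × List Int) q => (ac.1 ++ [q.1], ac.2 ++ [q.2])) (a, b))
      = (a ++ l.map Prod.fst, b ++ l.map Prod.snd) := by
  induction l generalizing a b with
  | nil => simp
  | cons q t ih => simp [List.foldl_cons, ih]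

theorem tl_countP {xs : List Int} {i : Int} (h : xs.Pairwise (· ≤ ·)) :
    tl xs i = xs.countP (fun v => decide (v ≤ i)) := by
  induction xs with
  | nil => rfl
  | cons a t ih =>
    rcases List.pairwise_cons.mp h with ⟨ha, ht⟩
    by_cases hai : a ≤ i
    · simp [tl, hai, ← ih ht]
    · have : t.countP (fun v => decide (v ≤ i)) = 0 := by
        rw [List.countP_eq_zero]
        intro v hv
        simp only [decide_eq_true_eq]
        intro hvi
        exact hai (le_trans (ha v hv) hvi)
      simp [tl, hai, this]

theorem tl_mono (xs : List Int) {i i' : Int} (h : i ≤ i') : tl xs i ≤ tl xs i' := by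
  induction xs with
  | nil => exact le_refl _
  | cons a t ih =>
    by_cases hai : a ≤ i
    · have hai' : a ≤ i' := le_trans hai h
      simp only [tl, List.takeWhile_cons, hai, hai', decide_true, if_true, List.length_cons]
      exact Nat.succ_le_succ ih
    · simp [tl, List.takeWhile_cons, hai]

theorem tl_le_length (xs : List Int) (i : Int) : tl xs i ≤ xs.length :=
  (List.takeWhile_prefix _).length_le

theorem takeWhile_stop (p : Int → Bool) (xs : List Int)
    (h : (xs.takeWhile p).length < xs.length) :
    p (xs[(xs.takeWhile p).length]'h) = false := by
  induction xs with
  | nil => simp at h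
  | cons a t ih =>
    by_cases ha : p a
    · simp only [List.takeWhile_cons, ha, if_true] at h ⊢
      simpa using ih (by simpa using h)
    · simp [List.takeWhile_cons, ha]

theorem advA_eq (xs : List Int) (i : Int) :
    ∀ (fuel j : Nat), j ≤ tl xs i → xs.length < j + fuel → advA xs i j fuel = tl xs i := by
  intro fuel
  induction fuel with
  | zero =>
    intro j hj hf
    have := tl_le_length xs i
    omega
  | succ fuel ih =>
    intro j hj hf
    rcases lt_or_eq_of_le hj with hlt | heq
    · have hjlen : j < xs.length := lt_of_lt_of_le hlt (tl_le_length xs i)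
      have hmem : xs[j] ∈ xs.takeWhile (fun v => decide (v ≤ i)) := by
        have hjt : j < (xs.takeWhile (fun v => decide (v ≤ i))).length := hlt
        have hpre := (List.takeWhile_prefix (l := xs) (fun v => decide (v ≤ i))).getElem hjt
        exact hpre ▸ List.getElem_mem hjt
      have hle : xs[j] ≤ i := by simpa using List.mem_takeWhile_imp hmem
      rw [advA, List.getElem?_eq_getElem hjlen]
      simp only [hle, if_true]
      exact ih (j + 1) hlt (by omega)
    · rcases lt_or_eq_of_le (tl_le_length xs i) with hlen | hlen
      · have hstop := takeWhile_stop (fun v => decide (v ≤ i)) xs hlen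
        simp only [decide_eq_false_iff_not] at hstop
        have hstop' : ¬ (xs[tl xs i]'hlen ≤ i) := hstop
        rw [advA, heq, List.getElem?_eq_getElem hlen]
        simp [hstop']
      · rw [advA, heq, hlen, List.getElem?_eq_none (by omega)]

theorem tl_append_sentinel {sL : List Int} {s i : Int} (hp : sL.Pairwise (· ≤ ·))
    (hcase : i < s ∨ ∃ x ∈ sL, i < x) :
    tl (sL ++ [s]) i = sL.countP (fun v => decide (v ≤ i)) := by
  unfold tl
  rw [List.takeWhile_append]
  by_cases hall : ∀ x ∈ sL, x ≤ i
  · have hfull : sL.takeWhile (fun v => decide (v ≤ i)) = sL :=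
      List.takeWhile_eq_self_iff.mpr (by simpa using hall)
    have hs : i < s := by
      rcases hcase with h | ⟨x, hx, hix⟩
      · exact h
      · exact absurd (hall x hx) (not_le.mpr hix)
    rw [hfull, if_pos rfl]
    have hnil : List.takeWhile (fun v => decide (v ≤ i)) [s] = [] := by
      simp [not_le.mpr hs]
    rw [hnil, List.append_nil]
    exact ((List.countP_eq_length).mpr (fun a ha => by simpa using hall a ha)).symm
  · rcases not_forall.mp hall with ⟨x, hxw⟩
    rcases _root_.not_imp.mp hxw with ⟨hx, hxle⟩
    have hxi : i < x := not_le.mp hxle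
    have hlt : (sL.takeWhile (fun v => decide (v ≤ i))).length < sL.length := by
      rcases lt_or_eq_of_le (tl_le_length sL i) with h | h
      · exact h
      · exfalso
        have : sL.takeWhile (fun v => decide (v ≤ i)) = sL :=
          (List.takeWhile_prefix _).eq_of_length h
        have hxle := List.takeWhile_eq_self_iff.mp this x hx
        simp only [decide_eq_true_eq] at hxle
        exact absurd hxle (not_le.mpr hxi)
    rw [if_neg (by omega)]
    exact tl_countP hp

theorem innerB (LRs : List (Int × Int)) (p : Int) :
    ∀ c : Int,
      LRs.foldl (fun (c : Int) t =>
        if t.1 ≤ p then (if t.2 ≤ p then c + 1 else c) - 1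
        else (if t.2 ≤ p then c + 1 else c)) c
      = c + (LRs.countP (fun t => decide (t.2 ≤ p)) : Int)
          - (LRs.countP (fun t => decide (t.1 ≤ p)) : Int) := by
  induction LRs with
  | nil => intro c; simp
  | cons q t ih =>
    intro c
    simp only [List.foldl_cons, List.countP_cons, ih]
    split_ifs <;> simp_all <;> omega

theorem foldl_max_mem_proj {α : Type} (g : α → Int) :
    ∀ (xs : List α) (a : Int),
      xs.foldl (fun acc x => max acc (g x)) a = a ∨
        ∃ x ∈ xs, xs.foldl (fun acc x => max acc (g x)) a = g x := by
  intro xs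
  induction xs with
  | nil => intro a; left; rfl
  | cons x t ih =>
    intro a
    rcases ih (max a (g x)) with h | ⟨y, hy, h⟩
    · rcases max_choice a (g x) with hm | hm
      · left; rw [hm] at h; rw [List.foldl_cons, hm]; exact h
      · right; exact ⟨x, List.mem_cons_self, by rw [List.foldl_cons, h, hm]⟩
    · right; exact ⟨y, List.mem_cons_of_mem _ hy, by rw [List.foldl_cons, h]⟩

theorem argmax_snd (l : List (Int × Int)) (i : Int) :
    (∃ q ∈ l, q.2 ≤ i) → ∃ m ∈ l, m.2 ≤ i ∧ ∀ q ∈ l, q.2 ≤ i → q.2 ≤ m.2 := by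
  induction l with
  | nil => rintro ⟨q, hq, -⟩; cases hq
  | cons a t ih =>
    rintro ⟨q, hq, hqi⟩
    by_cases hex : ∃ q ∈ t, q.2 ≤ i
    · rcases ih hex with ⟨m, hm, hmi, hmax⟩
      by_cases ham : a.2 ≤ i ∧ m.2 ≤ a.2
      · refine ⟨a, List.mem_cons_self, ham.1, ?_⟩
        intro r hr hrle
        rcases List.mem_cons.mp hr with rfl | hrt
        · exact le_refl _
        · exact le_trans (hmax r hrt hrle) ham.2
      · refine ⟨m, List.mem_cons_of_mem _ hm, hmi, ?_⟩
        intro r hr hrle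
        rcases List.mem_cons.mp hr with rfl | hrt
        · rcases not_and_or.mp ham with h | h
          · exact absurd hrle h
          · exact le_of_not_ge h
        · exact hmax r hrt hrle
    · have haq : q = a := by
        rcases List.mem_cons.mp hq with h | hqt
        · exact h
        · exact absurd ⟨q, hqt, hqi⟩ hex
      subst haq
      refine ⟨q, List.mem_cons_self, hqi, ?_⟩
      intro r hr hrle
      rcases List.mem_cons.mp hr with rfl | hrt
      · exact le_refl _
      · exact absurd ⟨r, hrt, hrle⟩ hex

theorem if_gt_eq_max (a c : Int) : (if c > a then c else a) = max a c := by
  split_ifs with h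
  · exact (max_eq_right h.le).symm
  · exact (max_eq_left (not_lt.mp h)).symm

theorem loopA (Lx Rx : List Int) (LR : List (Int × Int)) (N : Int)
    (H1 : ∀ i : Int, 1 ≤ i → i ≤ N → tl Lx i = LR.countP (fun q => decide (q.1 ≤ i)))
    (H2 : ∀ i : Int, 1 ≤ i → i ≤ N → tl Rx i = LR.countP (fun q => decide (q.2 ≤ i))) :
    ∀ (is : List Int), (∀ i ∈ is, 1 ≤ i ∧ i ≤ N) → is.Pairwise (· ≤ ·) →
    ∀ (a : Int) (j k : Nat), (∀ i ∈ is, j ≤ tl Lx i ∧ k ≤ tl Rx i) →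
    (is.foldl (fun (s : Int × Nat × Nat) i =>
        (max s.1 ((advA Rx i s.2.2 (Rx.length + 1) : Int) - (advA Lx i s.2.1 (Lx.length + 1) : Int)),
         advA Lx i s.2.1 (Lx.length + 1), advA Rx i s.2.2 (Rx.length + 1))) (a, j, k)).1
      = is.foldl (fun acc i => max acc (fDiff LR i)) a := by
  intro is
  induction is with
  | nil => intro _ _ a j k _; rfl
  | cons i t ih =>
    intro hbd hpw a j k hjk
    have hi := hbd i List.mem_cons_self
    have hjki := hjk i List.mem_cons_self
    have hL : advA Lx i j (Lx.length + 1) = tl Lx i :=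
      advA_eq Lx i (Lx.length + 1) j hjki.1 (by omega)
    have hR : advA Rx i k (Rx.length + 1) = tl Rx i :=
      advA_eq Rx i (Rx.length + 1) k hjki.2 (by omega)
    have hstep : fDiff LR i = ((tl Rx i : Int) - (tl Lx i : Int)) := by
      rw [fDiff, H1 i hi.1 hi.2, H2 i hi.1 hi.2]
    rcases List.pairwise_cons.mp hpw with ⟨hile, hpt⟩
    simp only [List.foldl_cons, hL, hR]
    rw [hstep]
    exact ih (fun i' hi' => hbd i' (List.mem_cons_of_mem _ hi')) hpt _ _ _
      (fun i' hi' => ⟨tl_mono Lx (hile i' hi'), tl_mono Rx (hile i' hi')⟩)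

theorem solveA_char (N D : Int) (LR : List (Int × Int)) (hPre : Pre_solve N D LR) :
    solve N D LR = (PySem.List.pyRange 1 (N + 1)).foldl (fun acc i => max acc (fDiff LR i)) 0 := by
  have hperm2 := PySem.List.sorted2_perm LR Prod.fst Prod.snd false
  have H : ∀ (f : Int × Int → Int) (i : Int), 1 ≤ i → i ≤ N →
      ((∃ q ∈ LR, N < f q) ∨ N ≤ 10 ^ 9) →
      tl (PySem.List.sorted ((PySem.List.sorted2 LR Prod.fst Prod.snd).map f) (fun x => x)
          ++ [10 ^ 9 + 1]) i
        = LR.countP (fun q => decide (f q ≤ i)) := by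
    intro f i h1 hN hc
    have hpw : (PySem.List.sorted ((PySem.List.sorted2 LR Prod.fst Prod.snd).map f)
        (fun x => x)).Pairwise (· ≤ ·) := PySem.List.sorted_pairwise _ _
    have hperm : (PySem.List.sorted ((PySem.List.sorted2 LR Prod.fst Prod.snd).map f)
        (fun x => x)).Perm ((PySem.List.sorted2 LR Prod.fst Prod.snd).map f) :=
      PySem.List.sorted_perm _ _ _
    have hcase : i < 10 ^ 9 + 1 ∨
        ∃ x ∈ PySem.List.sorted ((PySem.List.sorted2 LR Prod.fst Prod.snd).map f)
          (fun x => x), i < x := by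
      rcases hc with ⟨q, hq, hNq⟩ | hsmall
      · right
        refine ⟨f q, ?_, by omega⟩
        exact hperm.mem_iff.mpr (List.mem_map.mpr ⟨q, hperm2.mem_iff.mpr hq, rfl⟩)
      · left; omega
    rw [tl_append_sentinel hpw hcase, hperm.countP_eq, List.countP_map]
    exact (hperm2.countP_eq _).symm ▸ rfl
  have H1 : ∀ i : Int, 1 ≤ i → i ≤ N →
      tl (PySem.List.sorted ((PySem.List.sorted2 LR Prod.fst Prod.snd).map Prod.fst)
          (fun x => x) ++ [10 ^ 9 + 1]) i
        = LR.countP (fun q => decide (q.1 ≤ i)) := by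
    intro i h1 hN
    refine H Prod.fst i h1 hN ?_
    rcases hPre with h | ⟨h, _⟩
    · exact Or.inr h
    · exact Or.inl h
  have H2 : ∀ i : Int, 1 ≤ i → i ≤ N →
      tl (PySem.List.sorted ((PySem.List.sorted2 LR Prod.fst Prod.snd).map Prod.snd)
          (fun x => x) ++ [10 ^ 9 + 1]) i
        = LR.countP (fun q => decide (q.2 ≤ i)) := by
    intro i h1 hN
    refine H Prod.snd i h1 hN ?_
    rcases hPre with h | ⟨_, h⟩
    · exact Or.inr h
    · exact Or.inl h
  have key := loopA _ _ LR N H1 H2 (PySem.List.pyRange 1 (N + 1))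
    (fun i hi => by
      rcases PySem.List.mem_pyRange_one.mp hi with ⟨ha, hb⟩
      exact ⟨ha, by omega⟩)
    ((PySem.List.pairwise_lt_pyRange_one 1 (N + 1)).imp le_of_lt)
    0 0 0 (fun i _ => ⟨Nat.zero_le _, Nat.zero_le _⟩)
  simp only [solve, pairBuild, List.nil_append]
  exact key

theorem solveB_char (N D : Int) (LR : List (Int × Int)) :
    solve_alt N D LR = (PySem.List.sorted2 LR Prod.fst Prod.snd).foldl
      (fun acc q => if (if q.2 > 1 then q.2 else 1) ≤ N
        then max acc (fDiff LR (if q.2 > 1 then q.2 else 1)) else acc) 0 := by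
  have hperm2 := PySem.List.sorted2_perm LR Prod.fst Prod.snd false
  simp only [solve_alt]
  apply PySem.List.foldl_congr_mem
  intro acc q _
  by_cases hp : (if q.2 > 1 then q.2 else 1) ≤ N
  · rw [if_pos hp, if_pos hp, innerB, if_gt_eq_max]
    have : (0 : Int)
        + ((PySem.List.sorted2 LR Prod.fst Prod.snd).countP
            (fun t => decide (t.2 ≤ if q.2 > 1 then q.2 else 1)) : Int)
        - ((PySem.List.sorted2 LR Prod.fst Prod.snd).countP
            (fun t => decide (t.1 ≤ if q.2 > 1 then q.2 else 1)) : Int)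
        = fDiff LR (if q.2 > 1 then q.2 else 1) := by
      rw [fDiff, hperm2.countP_eq, hperm2.countP_eq]
      ring
    rw [this]
  · rw [if_neg hp, if_neg hp]

theorem maxEq (N : Int) (LR : List (Int × Int)) :
    (PySem.List.pyRange 1 (N + 1)).foldl (fun acc i => max acc (fDiff LR i)) 0
      = (PySem.List.sorted2 LR Prod.fst Prod.snd).foldl
          (fun acc q => if (if q.2 > 1 then q.2 else 1) ≤ N
            then max acc (fDiff LR (if q.2 > 1 then q.2 else 1)) else acc) 0 := by
  have hperm2 := PySem.List.sorted2_perm LR Prod.fst Prod.snd false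
  rw [PySem.List.foldl_ite_eq_foldl_filter
    (fun q : Int × Int => (if q.2 > 1 then q.2 else 1) ≤ N)
    (fun acc q => max acc (fDiff LR (if q.2 > 1 then q.2 else 1)))]
  apply le_antisymm
  · rcases foldl_max_mem_proj (fun i => fDiff LR i) (PySem.List.pyRange 1 (N + 1)) 0 with h | ⟨i, hi, h⟩
    · rw [h]
      exact (PySem.List.le_foldl_max_int _ _ 0).1
    · rw [h]
      rcases PySem.List.mem_pyRange_one.mp hi with ⟨h1, h2⟩
      have hiN : i ≤ N := by omega
      by_cases hle : fDiff LR i ≤ 0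
      · exact le_trans hle (PySem.List.le_foldl_max_int _ _ 0).1
      · have hpos : 0 < fDiff LR i := not_le.mp hle
        have hcnt : 0 < LR.countP (fun q => decide (q.2 ≤ i)) := by
          by_contra hz
          have : LR.countP (fun q => decide (q.2 ≤ i)) = 0 := by omega
          rw [fDiff, this] at hpos
          have := Int.natCast_nonneg (LR.countP (fun q => decide (q.1 ≤ i)))
          omega
        rcases List.countP_pos_iff.mp hcnt with ⟨q, hq, hq2⟩
        simp only [decide_eq_true_eq] at hq2
        rcases argmax_snd LR i ⟨q, hq, hq2⟩ with ⟨m, hm, hmi, hmax⟩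
        have hpi : (if m.2 > 1 then m.2 else 1) ≤ i := by
          split_ifs
          · exact hmi
          · exact h1
        have hm2p : m.2 ≤ (if m.2 > 1 then m.2 else 1) := by
          split_ifs with h'
          · exact le_refl _
          · omega
        have hpN : (if m.2 > 1 then m.2 else 1) ≤ N := le_trans hpi hiN
        have hcR : LR.countP (fun q => decide (q.2 ≤ if m.2 > 1 then m.2 else 1))
            = LR.countP (fun q => decide (q.2 ≤ i)) := by
          refine List.countP_congr ?_
          intro x hx
          simp only [decide_eq_true_eq]
          constructor
          · intro hxp; exact le_trans hxp hpi
          · intro hxi; exact le_trans (hmax x hx hxi) hm2p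
        have hcL : LR.countP (fun q => decide (q.1 ≤ if m.2 > 1 then m.2 else 1))
            ≤ LR.countP (fun q => decide (q.1 ≤ i)) := by
          refine List.countP_mono_left ?_
          intro x hx hxp
          simp only [decide_eq_true_eq] at hxp ⊢
          exact le_trans hxp hpi
        have hfd : fDiff LR i ≤ fDiff LR (if m.2 > 1 then m.2 else 1) := by
          rw [fDiff, fDiff, hcR]
          omega
        refine le_trans hfd ?_
        refine (PySem.List.le_foldl_max_int _ _ 0).2 m ?_
        exact List.mem_filter.mpr ⟨hperm2.mem_iff.mpr hm, by simpa using hpN⟩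
  · rcases foldl_max_mem_proj (fun q : Int × Int => fDiff LR (if q.2 > 1 then q.2 else 1))
      ((PySem.List.sorted2 LR Prod.fst Prod.snd).filter
        (fun q => decide ((if q.2 > 1 then q.2 else 1) ≤ N))) 0 with h | ⟨q, hq, h⟩
    · rw [h]
      exact (PySem.List.le_foldl_max_int _ _ 0).1
    · rw [h]
      rcases List.mem_filter.mp hq with ⟨_, hqN⟩
      simp only [decide_eq_true_eq] at hqN
      have h1 : (1 : Int) ≤ (if q.2 > 1 then q.2 else 1) := by
        split_ifs with h'
        · omega
        · exact le_refl _
      refine (PySem.List.le_foldl_max_int _ _ 0).2 _ ?_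
      exact PySem.List.mem_pyRange_one.mpr ⟨h1, by omega⟩

theorem solve_spec : Claim_equal_solve := by
  intro N D LR hDom hPre
  unfold Spec_solve
  rw [solveA_char N D LR hPre, solveB_char N D LR]
  exact maxEq N LR
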